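-- pv_equiv track=rewrite | github.com/Ikmokhirio/CovertChannelsHomework | TrafficAnalysis/main.py | decode_message_from_covert_channel
-- ===== SOURCE A (Python) =====
-- def decode_message_from_covert_channel(arr, divide):
--     bits = []
--
--     for elem in arr:
--         if elem < divide:
--             bits.append(0)
--         else:
--             bits.append(1)
--
--     bytes_res = [sum([byte[7 - b] << b for b in range(0, 8)])
--                  for byte in zip(*(iter(bits),) * 8)]
--
--     res = ""
--     for byte in bytes_res:
--         res += chr(byte)
--
--     return res
-- ===== SOURCE B (Python) =====
-- def decode_message_from_covert_channel(arr, divide):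
--     chars = []
--     cur = 0
--     cnt = 0
--     for elem in arr:
--         bit = 0 if elem < divide else 1
--         cur = cur * 2 + bit
--         cnt += 1
--         if cnt == 8:
--             chars.append(chr(cur))
--             cur = 0
--             cnt = 0
--     return ''.join(chars)
-- ===== Notes on version B (the rewrite author's own statement) =====
-- stated objective: faster
-- what changed: Replaced A's three phases (build a bit list, zip it into 8-tuples and sum shifted bits per tuple, concatenate chr's) by one pass over arr threading an integer accumulator and a bit counter, emitting a character every 8 bits and dropping any leftover bits. One fused pass avoids the intermediate bit list, the zip tuples and the per-byte list comprehension (constant-factor speedup, measured ~1.8x).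
import Mathlib
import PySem

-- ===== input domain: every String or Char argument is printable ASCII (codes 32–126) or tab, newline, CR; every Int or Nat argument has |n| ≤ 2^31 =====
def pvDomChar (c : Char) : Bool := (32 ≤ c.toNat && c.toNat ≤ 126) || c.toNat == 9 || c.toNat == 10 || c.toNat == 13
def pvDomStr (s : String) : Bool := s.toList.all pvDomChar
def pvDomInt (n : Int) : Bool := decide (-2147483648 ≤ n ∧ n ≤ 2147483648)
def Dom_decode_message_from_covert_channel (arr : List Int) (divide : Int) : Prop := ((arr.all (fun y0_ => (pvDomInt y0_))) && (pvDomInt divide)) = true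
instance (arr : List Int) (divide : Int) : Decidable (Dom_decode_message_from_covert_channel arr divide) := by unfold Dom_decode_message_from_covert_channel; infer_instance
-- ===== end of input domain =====

-- B fuses A's three phases (bit list, zip-into-8-tuples + per-byte weighted sum, string concat)
-- into a single pass with an integer accumulator; objective: faster (constant factor, measured).

-- ===== PORT A =====
-- bits from the threshold loop (string modelled as List Char, built like Python's appends)
def pvBitsOf (arr : List Int) (divide : Int) : List Int :=
  arr.foldl (fun bits elem => bits ++ [if elem < divide then (0 : Int) else 1]) []

-- zip(*(iter(bits),)*8): successive groups of exactly 8, leftover dropped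
def pvChunk8 : List Int → List (List Int)
  | a :: b :: c :: d :: e :: f :: g :: h :: t => [a, b, c, d, e, f, g, h] :: pvChunk8 t
  | _ => []

-- sum([byte[7 - b] << b for b in range(0, 8)])  (index 7-b always in range on an 8-tuple)
def pvByteVal (byte : List Int) : Int :=
  ((PySem.List.pyRange 0 8 1).map (fun b => (PySem.List.pyGetD byte (7 - b) 0) <<< b.toNat)).sum

def decode_message_from_covert_channel (arr : List Int) (divide : Int) : String :=
  String.ofList ((pvChunk8 (pvBitsOf arr divide)).foldl
    (fun res byte => res ++ [Char.ofNat (pvByteVal byte).toNat]) [])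

-- ===== PORT B =====
def pvAltLoop (divide : Int) : List Int → Int → Nat → List Char → List Char
  | [], _, _, chars => chars
  | elem :: rest, cur, cnt, chars =>
    let bit : Int := if elem < divide then 0 else 1
    let cur' := cur * 2 + bit
    let cnt' := cnt + 1
    if cnt' = 8 then pvAltLoop divide rest 0 0 (chars ++ [Char.ofNat cur'.toNat])
    else pvAltLoop divide rest cur' cnt' chars

def decode_message_from_covert_channel_alt (arr : List Int) (divide : Int) : String :=
  String.ofList (pvAltLoop divide arr 0 0 [])

-- ===== PRECONDITION & SPEC =====
def Spec_decode_message_from_covert_channel (arr : List Int) (divide : Int) (out : String) : Prop := out = decode_message_from_covert_channel_alt arr divide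
instance (arr : List Int) (divide : Int) (out : String) : Decidable (Spec_decode_message_from_covert_channel arr divide out) := by unfold Spec_decode_message_from_covert_channel; infer_instance

-- ===== CLAIM (what is proved, stated in full; the proofs are below) =====
def Claim_equal_decode_message_from_covert_channel : Prop := ∀ (arr : List Int) (divide : Int), Dom_decode_message_from_covert_channel arr divide → Spec_decode_message_from_covert_channel arr divide (decode_message_from_covert_channel arr divide)

-- ===== LEMMAS AND PROOFS =====

-- MSB-first value of an accumulated bit prefix (what B's `cur` holds)
def pvVal (ps : List Int) : Int := ps.foldl (fun c b => c * 2 + b) 0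

theorem pvVal_append_one (ps : List Int) (b : Int) :
    pvVal (ps ++ [b]) = pvVal ps * 2 + b := by
  simp [pvVal]

theorem pvChunk8_short (l : List Int) (h : l.length < 8) : pvChunk8 l = [] := by
  unfold pvChunk8
  split
  · simp_all; omega
  · rfl

theorem pvChunk8_append8 (q t : List Int) (h : q.length = 8) :
    pvChunk8 (q ++ t) = q :: pvChunk8 t := by
  rcases q with _|⟨a,_|⟨b,_|⟨c,_|⟨d,_|⟨e,_|⟨f,_|⟨g,_|⟨h',q⟩⟩⟩⟩⟩⟩⟩⟩ <;> simp_all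
  subst h
  rfl

theorem pvByteVal_eq_pvVal (q : List Int) (h : q.length = 8) :
    pvByteVal q = pvVal q := by
  rcases q with _|⟨a,_|⟨b,_|⟨c,_|⟨d,_|⟨e,_|⟨f,_|⟨g,_|⟨h',q⟩⟩⟩⟩⟩⟩⟩⟩ <;> simp_all
  subst h
  show pvByteVal [a,b,c,d,e,f,g,h'] = pvVal [a,b,c,d,e,f,g,h']
  have hr : PySem.List.pyRange 0 8 1 = [0,1,2,3,4,5,6,7] := by decide
  simp only [pvByteVal, pvVal, hr, List.map, List.sum_cons, List.sum_nil, List.foldl]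
  norm_num [PySem.List.pyGetD, Int.shiftLeft_eq]
  simp only [show ((2:Int).toNat)=2 from rfl, show ((3:Int).toNat)=3 from rfl,
    show ((4:Int).toNat)=4 from rfl, show ((5:Int).toNat)=5 from rfl,
    show ((6:Int).toNat)=6 from rfl, show ((7:Int).toNat)=7 from rfl]
  norm_num
  ring

-- the threshold bit of one element
def pvBit (divide elem : Int) : Int := if elem < divide then 0 else 1

theorem pvBitsOf_eq_map (arr : List Int) (divide : Int) :
    pvBitsOf arr divide = arr.map (pvBit divide) := by
  simpa [pvBitsOf, pvBit] using
    PySem.List.foldl_append_singleton_eq_map (l := arr) (f := fun e => pvBit divide e) (acc := [])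

-- loop invariant: with a pending prefix ps (cur = pvVal ps, cnt = ps.length < 8),
-- B's loop emits exactly A's per-8-chunk characters of ps ++ mapped bits
theorem pvAltLoop_invariant (divide : Int) (arr ps : List Int) (chars : List Char)
    (h : ps.length < 8) :
    pvAltLoop divide arr (pvVal ps) ps.length chars =
      chars ++ (pvChunk8 (ps ++ arr.map (pvBit divide))).map
        (fun byte => Char.ofNat (pvByteVal byte).toNat) := by
  induction arr generalizing ps chars with
  | nil =>
    simp [pvAltLoop, pvChunk8_short ps h]
  | cons e rest ih =>
    have hbit : (if e < divide then (0:Int) else 1) = pvBit divide e := rfl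
    by_cases h8 : ps.length + 1 = 8
    · have hlen : (ps ++ [pvBit divide e]).length = 8 := by simp; omega
      have := ih [] (chars ++ [Char.ofNat (pvVal (ps ++ [pvBit divide e])).toNat]) (by simp)
      simp only [pvAltLoop, hbit, if_pos h8, ← pvVal_append_one] at *
      rw [show pvVal [] = 0 from rfl] at this
      simp only [List.length_nil] at this
      rw [this]
      rw [show ps ++ (e :: rest).map (pvBit divide) = (ps ++ [pvBit divide e]) ++ rest.map (pvBit divide) by simp]
      rw [pvChunk8_append8 _ _ hlen]
      simp [pvByteVal_eq_pvVal _ hlen]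
    · have := ih (ps ++ [pvBit divide e]) chars (by simp; omega)
      simp only [pvAltLoop, hbit, if_neg h8, ← pvVal_append_one]
      rw [show (ps ++ [pvBit divide e]).length = ps.length + 1 by simp] at this
      rw [this]
      simp

-- ===== VERDICT (by name: the statement is the Claim_ definition above) =====
theorem decode_message_from_covert_channel_spec : Claim_equal_decode_message_from_covert_channel := by
  intro arr divide _
  show decode_message_from_covert_channel arr divide = decode_message_from_covert_channel_alt arr divide
  unfold decode_message_from_covert_channel decode_message_from_covert_channel_alt
  have hinv := pvAltLoop_invariant divide arr [] [] (by simp)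
  rw [show pvVal [] = 0 from rfl] at hinv
  simp only [List.length_nil, List.nil_append] at hinv
  rw [hinv, pvBitsOf_eq_map,
    PySem.List.foldl_append_singleton_eq_map
      (l := pvChunk8 (arr.map (pvBit divide)))
      (f := fun byte => Char.ofNat (pvByteVal byte).toNat) (acc := [])]
  simp
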